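-- pv_equiv track=rewrite | github.com/NasTul/KnowledgeTechnologies | Project1/PythonCode/after-gram2.py | ngram2
-- ===== SOURCE A (Python) =====
-- def ngram2(word1s,word2s):
--     bigram1s =list( zip(word1s, word1s[1:]))
--     bigram2s =list( zip(word2s, word2s[1:]))
--     G1len = len(bigram1s)
--     G2len = len(bigram2s)
--
--
--     G1=0
--     for i in bigram1s:
--         if i in bigram2s:
--             G1=G1+1
--             bigram2s.remove(i)
--
--
--     score = -(G1len + G2len - 2*G1)
--
--     return score
-- ===== SOURCE B (Python) =====
-- def _count(items):
--     c = {}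
--     for x in items:
--         c[x] = c.get(x, 0) + 1
--     return c
--
-- def ngram2(word1s, word2s):
--     c1 = _count(zip(word1s, word1s[1:]))
--     c2 = _count(zip(word2s, word2s[1:]))
--     g = sum(min(v, c2.get(k, 0)) for k, v in c1.items())
--     n1 = sum(c1.values())
--     n2 = sum(c2.values())
--     return 2 * g - n1 - n2
-- ===== Notes on version B (the rewrite author's own statement) =====
-- stated objective: faster
-- what changed: Replaces A's quadratic scan-with-mutation loop (membership test plus list.remove on a shrinking copy of the second bigram list) by two frequency tables built in one pass each, computing the multiset-intersection size as a sum of per-key minima over the first table's distinct keys.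
import Mathlib
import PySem

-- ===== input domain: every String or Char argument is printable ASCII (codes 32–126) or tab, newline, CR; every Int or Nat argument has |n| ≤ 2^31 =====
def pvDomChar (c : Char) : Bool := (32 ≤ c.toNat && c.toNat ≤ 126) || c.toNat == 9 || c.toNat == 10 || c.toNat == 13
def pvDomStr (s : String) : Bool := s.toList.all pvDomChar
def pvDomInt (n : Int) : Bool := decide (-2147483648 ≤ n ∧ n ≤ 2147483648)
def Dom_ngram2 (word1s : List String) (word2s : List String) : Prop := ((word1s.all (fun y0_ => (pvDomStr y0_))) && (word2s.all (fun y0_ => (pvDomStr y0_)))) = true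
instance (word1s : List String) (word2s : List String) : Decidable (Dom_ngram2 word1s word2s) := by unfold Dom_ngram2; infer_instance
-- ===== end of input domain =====

-- B replaces A's membership-test-and-remove loop over a mutated copy of the second bigram
-- list by two one-pass frequency tables combined key-by-key (sum of per-key minima); same
-- value everywhere (the score is the negated symmetric difference of the bigram multisets).

-- ===== PORT A =====
def ngram2 (word1s : List String) (word2s : List String) : Int :=
  let bigram1s := word1s.zip (PySem.List.slice word1s (some 1) none)
  let bigram2s := word2s.zip (PySem.List.slice word2s (some 1) none)
  let G1len : Int := bigram1s.length
  let G2len : Int := bigram2s.length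
  -- the for loop: state (G1, bigram2s); 'bigram2s.remove(i)' under the guard 'i in bigram2s'
  -- is exactly List.erase (PySem.List.remove?_eq_some_erase)
  let st := bigram1s.foldl
    (fun (st : Int × List (String × String)) i =>
      if i ∈ st.2 then (st.1 + 1, st.2.erase i) else st) (0, bigram2s)
  let score := -(G1len + G2len - 2 * st.1)
  score

-- ===== PORT B =====
-- Source B's _count: plain-dict counter c[x] = c.get(x, 0) + 1
def pvCount (items : List (String × String)) : PySem.Dict (String × String) Int :=
  items.foldl (fun c x => c.insert x (c.getD x 0 + 1)) PySem.Dict.empty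

def ngram2_alt (word1s : List String) (word2s : List String) : Int :=
  let c1 := pvCount (word1s.zip (PySem.List.slice word1s (some 1) none))
  let c2 := pvCount (word2s.zip (PySem.List.slice word2s (some 1) none))
  let g := (c1.items.map (fun kv => min kv.2 (c2.getD kv.1 0))).sum
  let n1 := c1.values.sum
  let n2 := c2.values.sum
  2 * g - n1 - n2

-- ===== PRECONDITION & SPEC =====
def Spec_ngram2 (word1s : List String) (word2s : List String) (out : Int) : Prop := out = ngram2_alt word1s word2s
instance (word1s : List String) (word2s : List String) (out : Int) : Decidable (Spec_ngram2 word1s word2s out) := by unfold Spec_ngram2; infer_instance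

-- ===== CLAIM (what is proved, stated in full; the proofs are below) =====
def Claim_equal_ngram2 : Prop := ∀ (word1s : List String) (word2s : List String), Dom_ngram2 word1s word2s → Spec_ngram2 word1s word2s (ngram2 word1s word2s)

-- ===== LEMMAS AND PROOFS =====

-- List.erase's instance for Prod strings agrees with the DecidableEq-derived one
theorem erase_inst (l : List (String × String)) (a : String × String) :
    l.erase a = @List.erase _ instBEqOfDecidableEq l a := by
  rw [List.erase_eq_eraseP, @List.erase_eq_eraseP _ instBEqOfDecidableEq _]
  congr 1
  funext b
  simp

-- the two BEq instances on String × String count alike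
theorem count_inst (a : String × String) (l : List (String × String)) :
    @List.count _ instBEqProd a l = @List.count _ instBEqOfDecidableEq a l := by
  simp only [List.count_eq_countP]
  congr 1
  funext b
  simp

theorem toFinset_coe (xs : List (String × String)) :
    (↑xs : Multiset (String × String)).toFinset = xs.toFinset := rfl

-- A's loop computes the multiset-intersection cardinality of the two bigram lists
theorem loopA_eq (xs : List (String × String)) (ys : List (String × String)) (g : Int) :
    (xs.foldl (fun (st : Int × List (String × String)) i =>
        if i ∈ st.2 then (st.1 + 1, st.2.erase i) else st) (g, ys)).1
      = g + Multiset.card ((↑xs : Multiset (String × String)) ∩ ↑ys) := by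
  induction xs generalizing ys g with
  | nil => simp
  | cons x xs ih =>
    by_cases h : x ∈ ys
    · simp only [List.foldl_cons, if_pos h]
      rw [ih, ← Multiset.cons_coe,
        Multiset.cons_inter_of_pos _ (by simpa using h),
        erase_inst, Multiset.coe_erase]
      simp; omega
    · simp only [List.foldl_cons, if_neg h]
      rw [ih, ← Multiset.cons_coe,
        Multiset.cons_inter_of_neg _ (by simpa using h)]

-- a sum of f over the distinct elements of xs is a Finset sum over xs.toFinset
theorem sum_ofList_eq_finset (xs : List (String × String)) (f : (String × String) → Int) :
    ((PySem.Set.ofList xs).map f).sum = ∑ a ∈ xs.toFinset, f a := by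
  rw [← List.sum_toFinset f (PySem.Set.nodup_ofList xs)]
  congr 1
  ext a
  simp [PySem.Set.mem_ofList]

theorem pvCount_eq_counter (xs : List (String × String)) :
    pvCount xs = PySem.Dict.counter xs :=
  PySem.Dict.foldl_insert_getD_add_one_eq_counter xs

-- sum of counter values = length of the list
theorem values_sum (xs : List (String × String)) :
    (pvCount xs).values.sum = (xs.length : Int) := by
  rw [pvCount_eq_counter]
  have hv : (PySem.Dict.counter xs).values
      = (PySem.Set.ofList xs).map (fun k => (xs.count k : Int)) := by
    simp [PySem.Dict.values, PySem.Dict.items_counter, Function.comp]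
  rw [hv, sum_ofList_eq_finset]
  have hc := Multiset.toFinset_sum_count_eq (↑xs : Multiset (String × String))
  simp only [Multiset.coe_count, Multiset.coe_card, toFinset_coe] at hc
  calc ∑ a ∈ xs.toFinset, (xs.count a : Int)
      = ((∑ a ∈ xs.toFinset, @List.count _ instBEqOfDecidableEq a xs : ℕ) : Int) := by
        push_cast
        exact Finset.sum_congr rfl (fun a _ => by rw [count_inst])
    _ = (xs.length : Int) := by rw [hc]

-- B's per-key minima sum = multiset-intersection cardinality
theorem minsum_eq (xs : List (String × String)) (ys : List (String × String)) :
    ((pvCount xs).items.map (fun kv => min kv.2 ((pvCount ys).getD kv.1 0))).sum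
      = (Multiset.card ((↑xs : Multiset (String × String)) ∩ ↑ys) : Int) := by
  rw [pvCount_eq_counter, pvCount_eq_counter, PySem.Dict.items_counter]
  have hmap : ((PySem.Set.ofList xs).map (fun k => (k, (xs.count k : Int)))).map
        (fun kv => min kv.2 ((PySem.Dict.counter ys).getD kv.1 0))
      = (PySem.Set.ofList xs).map (fun k => min (xs.count k : Int) (ys.count k : Int)) := by
    rw [List.map_map]
    exact List.map_congr_left (fun k _ => by simp [PySem.Dict.getD_counter])
  rw [hmap, sum_ofList_eq_finset]
  have key : ∑ a ∈ xs.toFinset,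
      Multiset.count a ((↑xs : Multiset (String × String)) ∩ ↑ys)
      = Multiset.card ((↑xs : Multiset (String × String)) ∩ ↑ys) := by
    rw [← Multiset.toFinset_sum_count_eq ((↑xs : Multiset (String × String)) ∩ ↑ys)]
    refine (Finset.sum_subset ?_ ?_).symm
    · intro a ha
      have hm := Multiset.mem_of_le (Multiset.inter_le_left
        (s := (↑xs : Multiset (String × String))) (t := (↑ys : Multiset (String × String))))
        (Multiset.mem_toFinset.mp ha)
      simpa [List.mem_toFinset] using hm
    · intro a _ ha
      exact Multiset.count_eq_zero.mpr (fun hm => ha (Multiset.mem_toFinset.mpr hm))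
  calc ∑ a ∈ xs.toFinset, min (xs.count a : Int) (ys.count a : Int)
      = ∑ a ∈ xs.toFinset,
          ((Multiset.count a ((↑xs : Multiset (String × String)) ∩ ↑ys) : ℕ) : Int) := by
        refine Finset.sum_congr rfl (fun a _ => ?_)
        rw [Multiset.count_inter]
        push_cast [Multiset.coe_count]
        rw [count_inst, count_inst]
    _ = ((∑ a ∈ xs.toFinset,
          Multiset.count a ((↑xs : Multiset (String × String)) ∩ ↑ys) : ℕ) : Int) := by
        push_cast
        rfl
    _ = _ := by rw [key]

-- ===== VERDICT (by name: the statement is the Claim_ definition above) =====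
theorem ngram2_spec : Claim_equal_ngram2 := by
  intro word1s word2s _
  unfold Spec_ngram2 ngram2 ngram2_alt
  set xs := word1s.zip (PySem.List.slice word1s (some 1) none) with hxs
  set ys := word2s.zip (PySem.List.slice word2s (some 1) none) with hys
  simp only
  rw [loopA_eq, minsum_eq, values_sum, values_sum]
  ring
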